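-- pv_equiv track=rewrite | github.com/compsage/exploration_and_prep | easy/palindrome_solutions.py | isAlphabeticPalindrome_ascii
-- ===== SOURCE A (Python) =====
-- def isAlphabeticPalindrome_ascii(code):
--     # Using ASCII values for case-insensitive comparison
--     # A-Z: 65-90, a-z: 97-122 (difference of 32)
--     # Uppercase letters can be converted by OR-ing with 32 (sets bit 5)
--     left, right = 0, len(code) - 1
--
--     while left < right:
--         # Skip non-alphabetic characters from left
--         while left < right and not code[left].isalpha():
--             left += 1
--
--         # Skip non-alphabetic characters from right
--         while left < right and not code[right].isalpha():
--             right -= 1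
--
--         # Convert both to lowercase using ASCII bit manipulation
--         # ord(c) | 32 converts uppercase to lowercase (sets bit 5)
--         # For lowercase letters, bit 5 is already set, so no change
--         left_char = ord(code[left]) | 32
--         right_char = ord(code[right]) | 32
--
--         if left_char != right_char:
--             return False
--
--         left += 1
--         right -= 1
--
--     return True
-- ===== SOURCE B (Python) =====
-- def isAlphabeticPalindrome_ascii(code):
--     chars = [ord(c) | 32 for c in code if c.isalpha()]
--     return chars == chars[::-1]
-- ===== Notes on version B (the rewrite author's own statement) =====
-- stated objective: simpler
-- what changed: Replaces the in-place two-pointer skip-scan over indices with a single pass that collects the normalized (ord|32) alphabetic codes into a list and compares it with its reverse.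
import Mathlib
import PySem

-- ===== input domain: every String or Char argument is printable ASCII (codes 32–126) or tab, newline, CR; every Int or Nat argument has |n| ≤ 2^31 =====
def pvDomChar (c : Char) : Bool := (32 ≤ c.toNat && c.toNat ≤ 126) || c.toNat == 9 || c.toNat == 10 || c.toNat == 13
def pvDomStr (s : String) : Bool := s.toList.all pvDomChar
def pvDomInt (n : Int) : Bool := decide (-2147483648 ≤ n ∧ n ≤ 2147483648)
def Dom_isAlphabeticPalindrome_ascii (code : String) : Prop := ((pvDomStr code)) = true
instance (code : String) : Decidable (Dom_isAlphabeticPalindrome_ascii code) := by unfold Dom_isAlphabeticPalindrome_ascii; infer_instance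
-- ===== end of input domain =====

-- B replaces A's in-place two-pointer skip-scan by collecting the normalized alphabetic
-- codes in one pass and comparing the list with its reverse (objective: simpler).


-- ===== PORT A =====
-- ord(c) | 32
def pvNorm (c : Char) : Nat := c.toNat ||| 32

-- inner 'while left < right and not code[left].isalpha(): left += 1'
-- (indices are provably in range wherever A reads them; getD's default is never used)
def pvSkipL (cs : List Char) (l r : Nat) : Nat :=
  if h : l < r ∧ ¬ PySem.Chars.isalpha (cs.getD l ' ') then pvSkipL cs (l + 1) r else l
termination_by r - l
decreasing_by omega

-- inner 'while left < right and not code[right].isalpha(): right -= 1'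
def pvSkipR (cs : List Char) (l r : Nat) : Nat :=
  if h : l < r ∧ ¬ PySem.Chars.isalpha (cs.getD r ' ') then pvSkipR cs l (r - 1) else r
termination_by r
decreasing_by omega

theorem pvSkipL_ge (cs : List Char) (l r : Nat) : l ≤ pvSkipL cs l r := by
  rw [pvSkipL]; split
  · exact Nat.le_trans (Nat.le_succ l) (pvSkipL_ge cs (l + 1) r)
  · exact Nat.le_refl l
termination_by r - l
decreasing_by omega

theorem pvSkipL_le (cs : List Char) (l r : Nat) (h : l ≤ r) : pvSkipL cs l r ≤ r := by
  rw [pvSkipL]; split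
  · next hc => exact pvSkipL_le cs (l + 1) r (by omega)
  · exact h
termination_by r - l
decreasing_by omega

theorem pvSkipR_le (cs : List Char) (l r : Nat) : pvSkipR cs l r ≤ r := by
  rw [pvSkipR]; split
  · next hc => exact Nat.le_trans (pvSkipR_le cs l (r - 1)) (by omega)
  · exact Nat.le_refl r
termination_by r
decreasing_by omega

-- outer 'while left < right: …' of A (indices are Nat: for the empty string Python's
-- right = -1 and the loop never runs, matched here by right = 0 with the same guard failing)
def pvLoop (cs : List Char) (l r : Nat) : Bool :=
  if h : l < r then
    if pvNorm (cs.getD (pvSkipL cs l r) ' ') ≠ pvNorm (cs.getD (pvSkipR cs (pvSkipL cs l r) r) ' ')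
    then false
    else pvLoop cs (pvSkipL cs l r + 1) (pvSkipR cs (pvSkipL cs l r) r - 1)
  else true
termination_by r - l
decreasing_by
  have h1 := pvSkipL_ge cs l r
  have _h2 := pvSkipL_le cs l r (by omega)
  have h3 := pvSkipR_le cs (pvSkipL cs l r) r
  omega

def isAlphabeticPalindrome_ascii (code : String) : Bool :=
  pvLoop code.toList 0 (code.toList.length - 1)

-- ===== PORT B =====
-- chars = [ord(c) | 32 for c in code if c.isalpha()]; return chars == chars[::-1]
def isAlphabeticPalindrome_ascii_alt (code : String) : Bool :=
  let chars := (code.toList.filter PySem.Chars.isalpha).map pvNorm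
  chars == chars.reverse

-- ===== PRECONDITION & SPEC =====
def Spec_isAlphabeticPalindrome_ascii (code : String) (out : Bool) : Prop := out = isAlphabeticPalindrome_ascii_alt code
instance (code : String) (out : Bool) : Decidable (Spec_isAlphabeticPalindrome_ascii code out) := by unfold Spec_isAlphabeticPalindrome_ascii; infer_instance

-- ===== CLAIM (what is proved, stated in full; the proofs are below) =====
def Claim_equal_isAlphabeticPalindrome_ascii : Prop := ∀ (code : String), Dom_isAlphabeticPalindrome_ascii code → Spec_isAlphabeticPalindrome_ascii code (isAlphabeticPalindrome_ascii code)

-- ===== LEMMAS AND PROOFS =====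

-- the normalized alphabetic codes of a char list (what B computes)
def pvNF (cs : List Char) : List Nat := (cs.filter PySem.Chars.isalpha).map pvNorm

-- the slice cs[l .. r] (inclusive bounds)
def pvSub (cs : List Char) (l r : Nat) : List Char := (cs.drop l).take (r + 1 - l)

theorem pvSub_cons (cs : List Char) (l r : Nat) (hl : l < cs.length) (hlr : l ≤ r) :
    pvSub cs l r = cs[l] :: pvSub cs (l + 1) r := by
  unfold pvSub
  rw [List.drop_eq_getElem_cons hl]
  rw [show r + 1 - l = (r - l) + 1 by omega, List.take_succ_cons]
  rw [show r + 1 - (l + 1) = r - l by omega]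

theorem pvSub_concat (cs : List Char) (l r : Nat) (hr : r < cs.length) (hlr : l ≤ r)
    (h1 : 1 ≤ r) : pvSub cs l r = pvSub cs l (r - 1) ++ [cs[r]] := by
  unfold pvSub
  rw [show r + 1 - l = (r - l) + 1 by omega, List.take_add_one]
  have hg : (cs.drop l)[r - l]? = some cs[r] := by
    rw [List.getElem?_drop, show l + (r - l) = r by omega, List.getElem?_eq_getElem hr]
  rw [hg, show r - 1 + 1 - l = r - l by omega]
  rfl

theorem pvSub_nil (cs : List Char) (l r : Nat) (h : r < l) : pvSub cs l r = [] := by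
  unfold pvSub
  rw [show r + 1 - l = 0 by omega, List.take_zero]

theorem pvNF_cons_alpha (c : Char) (cs : List Char) (h : PySem.Chars.isalpha c = true) :
    pvNF (c :: cs) = pvNorm c :: pvNF cs := by simp [pvNF, h]

theorem pvNF_cons_notalpha (c : Char) (cs : List Char) (h : ¬ PySem.Chars.isalpha c = true) :
    pvNF (c :: cs) = pvNF cs := by simp [pvNF, h]

theorem pvNF_append (xs ys : List Char) : pvNF (xs ++ ys) = pvNF xs ++ pvNF ys := by
  simp [pvNF]

-- palindrome test on the normalized codes, as B computes it
def pvPal (xs : List Nat) : Bool := xs == xs.reverse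

theorem pvPal_cons_concat (a b : Nat) (m : List Nat) :
    pvPal (a :: (m ++ [b])) = ((a == b) && pvPal m) := by
  rw [Bool.eq_iff_iff]
  simp only [pvPal, beq_iff_eq, Bool.and_eq_true, List.reverse_cons, List.reverse_append,
    List.reverse_cons, List.reverse_nil, List.nil_append, List.cons_append, List.cons.injEq]
  constructor
  · rintro ⟨h1, h2⟩
    subst h1
    exact ⟨rfl, by rwa [List.append_left_inj] at h2⟩
  · rintro ⟨h1, h2⟩
    subst h1
    exact ⟨rfl, by rw [← h2]⟩

theorem pvPal_small (xs : List Nat) (h : xs.length ≤ 1) : pvPal xs = true := by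
  match xs, h with
  | [], _ => rfl
  | [a], _ => simp [pvPal]

-- getD at an in-range index is getElem
theorem getD_eq (cs : List Char) (i : Nat) (h : i < cs.length) : cs.getD i ' ' = cs[i] := by
  simp [List.getD, List.getElem?_eq_getElem h]

-- skip functions do nothing when the current char is alphabetic
theorem pvSkipL_id (cs : List Char) (l r : Nat) (h : PySem.Chars.isalpha (cs.getD l ' ') = true) :
    pvSkipL cs l r = l := by
  rw [pvSkipL, dif_neg (fun hc => hc.2 h)]

theorem pvSkipR_id (cs : List Char) (l r : Nat) (h : PySem.Chars.isalpha (cs.getD r ' ') = true) :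
    pvSkipR cs l r = r := by
  rw [pvSkipR, dif_neg (fun hc => hc.2 h)]

-- stepping rule: left end not alphabetic
theorem pvLoop_step_left (cs : List Char) (l r : Nat) (hlr : l < r)
    (h : ¬ PySem.Chars.isalpha (cs.getD l ' ') = true) :
    pvLoop cs l r = pvLoop cs (l + 1) r := by
  have hskip : pvSkipL cs l r = pvSkipL cs (l + 1) r := by
    conv_lhs => rw [pvSkipL]
    rw [dif_pos ⟨hlr, h⟩]
  by_cases h2 : l + 1 < r
  · conv_lhs => rw [pvLoop]
    conv_rhs => rw [pvLoop]
    rw [dif_pos hlr, dif_pos h2, hskip]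
  · -- l + 1 = r: the left scan reaches r; A compares code[r] with itself and terminates
    have hr : l + 1 = r := by omega
    have hs1 : pvSkipL cs (l + 1) r = l + 1 := by
      rw [pvSkipL, dif_neg (fun hc => h2 hc.1)]
    have hs2 : pvSkipR cs (l + 1) r = r := by
      rw [pvSkipR, dif_neg (fun hc => h2 hc.1)]
    conv_lhs => rw [pvLoop]
    rw [dif_pos hlr, hskip, hs1, hs2, hr]
    rw [if_neg (by simp)]
    conv_lhs => rw [pvLoop]
    conv_rhs => rw [pvLoop]
    rw [dif_neg (by omega), dif_neg (by omega)]

-- stepping rule: left end alphabetic, right end not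
theorem pvLoop_step_right (cs : List Char) (l r : Nat) (hlr : l < r)
    (hl : PySem.Chars.isalpha (cs.getD l ' ') = true)
    (h : ¬ PySem.Chars.isalpha (cs.getD r ' ') = true) :
    pvLoop cs l r = pvLoop cs l (r - 1) := by
  have hsl : pvSkipL cs l r = l := pvSkipL_id cs l r hl
  have hsr : pvSkipR cs l r = pvSkipR cs l (r - 1) := by
    conv_lhs => rw [pvSkipR]
    rw [dif_pos ⟨hlr, h⟩]
  by_cases h2 : l < r - 1
  · conv_lhs => rw [pvLoop]
    conv_rhs => rw [pvLoop]
    rw [dif_pos hlr, dif_pos h2, hsl, pvSkipL_id cs l (r - 1) hl, hsr]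
  · -- l = r - 1: the right scan reaches l; A compares code[l] with itself and terminates
    have hs2 : pvSkipR cs l (r - 1) = r - 1 := by
      rw [pvSkipR, dif_neg (fun hc => h2 hc.1)]
    conv_lhs => rw [pvLoop]
    rw [dif_pos hlr, hsl, hsr, hs2, show r - 1 = l by omega]
    rw [if_neg (by simp)]
    conv_lhs => rw [pvLoop]
    conv_rhs => rw [pvLoop]
    rw [dif_neg (by omega), dif_neg (lt_irrefl l)]

-- stepping rule: both ends alphabetic
theorem pvLoop_step_both (cs : List Char) (l r : Nat) (hlr : l < r)
    (hl : PySem.Chars.isalpha (cs.getD l ' ') = true)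
    (hr : PySem.Chars.isalpha (cs.getD r ' ') = true) :
    pvLoop cs l r = if pvNorm (cs.getD l ' ') ≠ pvNorm (cs.getD r ' ') then false
                    else pvLoop cs (l + 1) (r - 1) := by
  conv_lhs => rw [pvLoop]
  rw [dif_pos hlr, pvSkipL_id cs l r hl, pvSkipR_id cs l r hr]

-- the loop returns true when the guard fails
theorem pvLoop_stop (cs : List Char) (l r : Nat) (h : ¬ l < r) : pvLoop cs l r = true := by
  rw [pvLoop, dif_neg h]

-- main invariant: A's loop on [l, r] decides whether the normalized alphabetic codes
-- of the slice cs[l..r] form a palindrome (B's computation on that slice)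
theorem pvLoop_eq_pal (n : Nat) (cs : List Char) (l r : Nat) (hfuel : r - l ≤ n)
    (hr : r < cs.length) : pvLoop cs l r = pvPal (pvNF (pvSub cs l r)) := by
  induction n generalizing l r with
  | zero =>
    rw [pvLoop_stop cs l r (by omega)]
    by_cases hle : l ≤ r
    · have : l = r := by omega
      subst this
      rw [pvSub_cons cs l l (by omega) (le_refl l), pvSub_nil cs (l + 1) l (by omega)]
      refine (pvPal_small _ ?_).symm
      by_cases hc : PySem.Chars.isalpha cs[l] = true
      · rw [pvNF_cons_alpha _ _ hc]; simp [pvNF]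
      · rw [pvNF_cons_notalpha _ _ hc]; simp [pvNF]
    · rw [pvSub_nil cs l r (by omega)]
      rfl
  | succ n ih =>
    by_cases hguard : l < r
    · have hlval : l < cs.length := by omega
      by_cases ha : PySem.Chars.isalpha (cs.getD l ' ') = true
      · by_cases hb : PySem.Chars.isalpha (cs.getD r ' ') = true
        · -- both ends alphabetic: compare and recurse on the inner slice
          have ha' : PySem.Chars.isalpha cs[l] = true := by rwa [getD_eq cs l hlval] at ha
          have hb' : PySem.Chars.isalpha cs[r] = true := by rwa [getD_eq cs r hr] at hb
          rw [pvLoop_step_both cs l r hguard ha hb]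
          have hsub : pvSub cs l r = cs[l] :: (pvSub cs (l + 1) (r - 1) ++ [cs[r]]) := by
            rw [pvSub_cons cs l r hlval (by omega),
                pvSub_concat cs (l + 1) r hr (by omega) (by omega)]
          rw [hsub, pvNF_cons_alpha _ _ ha', pvNF_append,
              show pvNF [cs[r]] = [pvNorm cs[r]] by simp [pvNF, hb'],
              pvPal_cons_concat, getD_eq cs l hlval, getD_eq cs r hr]
          by_cases hne : pvNorm cs[l] = pvNorm cs[r]
          · rw [if_neg (by simp [hne]), ih (l + 1) (r - 1) (by omega) (by omega), hne]
            simp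
          · rw [if_pos (by simp [hne]),
                show (pvNorm cs[l] == pvNorm cs[r]) = false from beq_eq_false_iff_ne.mpr hne]
            simp
        · -- right end not alphabetic: it contributes nothing to the filtered list
          have hb' : ¬ PySem.Chars.isalpha cs[r] = true := by rwa [getD_eq cs r hr] at hb
          rw [pvLoop_step_right cs l r hguard ha hb, ih l (r - 1) (by omega) (by omega)]
          rw [pvSub_concat cs l r hr (by omega) (by omega), pvNF_append,
              show pvNF [cs[r]] = [] by simp [pvNF, hb'], List.append_nil]
      · -- left end not alphabetic: it contributes nothing to the filtered list
        have ha' : ¬ PySem.Chars.isalpha cs[l] = true := by rwa [getD_eq cs l hlval] at ha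
        rw [pvLoop_step_left cs l r hguard ha, ih (l + 1) r (by omega) hr]
        rw [pvSub_cons cs l r hlval (by omega), pvNF_cons_notalpha _ _ ha']
    · rw [pvLoop_stop cs l r hguard]
      by_cases hle : l ≤ r
      · have : l = r := by omega
        subst this
        rw [pvSub_cons cs l l (by omega) (le_refl l), pvSub_nil cs (l + 1) l (by omega)]
        refine (pvPal_small _ ?_).symm
        by_cases hc : PySem.Chars.isalpha cs[l] = true
        · rw [pvNF_cons_alpha _ _ hc]; simp [pvNF]
        · rw [pvNF_cons_notalpha _ _ hc]; simp [pvNF]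
      · rw [pvSub_nil cs l r (by omega)]
        rfl

-- ===== VERDICT (by name: the statement is the Claim_ definition above) =====
theorem isAlphabeticPalindrome_ascii_spec : Claim_equal_isAlphabeticPalindrome_ascii := by
  intro code _
  unfold Spec_isAlphabeticPalindrome_ascii isAlphabeticPalindrome_ascii
    isAlphabeticPalindrome_ascii_alt
  cases hcs : code.toList with
  | nil =>
    rw [pvLoop_stop _ 0 _ (by simp)]
    rfl
  | cons c t =>
    rw [pvLoop_eq_pal ((c :: t).length - 1) (c :: t) 0 ((c :: t).length - 1)
      (le_refl _) (by simp)]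
    have hsub : pvSub (c :: t) 0 ((c :: t).length - 1) = c :: t := by
      unfold pvSub
      rw [List.drop_zero, show (c :: t).length - 1 + 1 - 0 = (c :: t).length by simp,
          List.take_length]
    rw [hsub]
    rfl
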